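-- pv_equiv track=rewrite | github.com/v86517/Python-FirstSteps | src/exercise10/task10.py | proc_input
-- ===== SOURCE A (Python) =====
-- def proc_input(l, t):
--     l.sort(key=lambda x: x[0])
--     filtered_dict = dict()
--     for i in range(len(l)):
--         if l[i][0] not in filtered_dict.keys():
--             if (i != (len(l)-1) and l[i+1][0] == l[i][0]) and l[i][2]<=t:
--                 filtered_dict[l[i][0]] = [[l[i][1], l[i][2]]]
--         else:
--             filtered_dict[l[i][0]].append([l[i][1], l[i][2]])
--
--     for key, value in filtered_dict.items():
--         filtered_dict[key] = sorted(value, key=lambda item: item[0])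
--
--     prices = []
--     for value in filtered_dict.values():
--         prices.append(value[0][0] + value[1][0])
--
--     return prices
-- ===== SOURCE B (Python) =====
-- # Run-based rewrite: walk the sorted list one run of equal keys at a time
-- # (no dict), pick the first non-last element with price <= t as starter,
-- # and concatenate the two lexicographically smallest names of the tail.
-- # Like A, it sorts l in place (same observable mutation).
-- def proc_input(l, t):
--     l.sort(key=lambda x: x[0])
--     res = []
--     rest = l
--     while rest:
--         k = rest[0][0]
--         i = 0
--         while i < len(rest) and rest[i][0] == k:
--             i += 1
--         run, rest = rest[:i], rest[i:]
--         for p in range(len(run) - 1):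
--             if run[p][2] <= t:
--                 names = sorted(x[1] for x in run[p:])
--                 res.append(names[0] + names[1])
--                 break
--     return res
-- ===== Notes on version B (the rewrite author's own statement) =====
-- stated objective: simpler
-- what changed: A builds a dict keyed by product name with a lookahead-and-membership state machine, then re-sorts each dict value and walks dict values; B walks the sorted list one run of equal keys at a time with no dict at all, picking the first non-last element of the run with price <= t and concatenating the two lexicographically smallest names of its tail.
import Mathlib
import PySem

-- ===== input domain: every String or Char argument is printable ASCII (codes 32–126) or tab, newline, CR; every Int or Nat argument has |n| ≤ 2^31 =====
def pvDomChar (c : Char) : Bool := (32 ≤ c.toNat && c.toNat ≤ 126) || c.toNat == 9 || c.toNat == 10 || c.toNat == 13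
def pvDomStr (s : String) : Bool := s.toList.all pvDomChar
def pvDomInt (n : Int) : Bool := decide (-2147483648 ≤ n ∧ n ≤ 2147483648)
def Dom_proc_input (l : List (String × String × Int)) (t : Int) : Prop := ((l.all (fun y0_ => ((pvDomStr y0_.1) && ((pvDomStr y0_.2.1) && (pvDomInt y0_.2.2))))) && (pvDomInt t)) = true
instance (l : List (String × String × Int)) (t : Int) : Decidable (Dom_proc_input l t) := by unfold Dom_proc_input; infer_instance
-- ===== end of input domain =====

-- B rewrites A's dict-building pass as a direct walk over runs of equal keys in
-- the sorted list (no dict); objective: simpler. In Python both A and B sort `l`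
-- in place (the same observable mutation); the equivalence proved here is about
-- the RETURN value.

-- ===== PORT A =====
-- body of A's first loop, `for i in range(len(l))`
def aBody (t : Int) (s : List (String × String × Int)) (n : Int)
    (d : PySem.Dict String (List (String × Int))) (i : Int) :
    PySem.Dict String (List (String × Int)) :=
  let x := PySem.List.pyGetD s i ("", "", 0)
  if d.contains x.1 = false then
    if decide (i ≠ n - 1) && ((PySem.List.pyGetD s (i + 1) ("", "", 0)).1 == x.1)
        && decide (x.2.2 ≤ t) then
      d.insert x.1 [(x.2.1, x.2.2)]
    else d
  else
    -- filtered_dict[l[i][0]].append([...]) : in-place append on the stored list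
    d.modify x.1 [] (fun v => v ++ [(x.2.1, x.2.2)])

def proc_input (l : List (String × String × Int)) (t : Int) : List String :=
  let s := PySem.List.sorted l (fun x => x.1) false
  let d := (PySem.List.pyRange 0 (PySem.List.len s) 1).foldl
    (aBody t s (PySem.List.len s)) (PySem.Dict.mk [])
  let d2 := d.items.foldl
    (fun d kv => d.insert kv.1 (PySem.List.sorted kv.2 (fun it => it.1) false)) d
  d2.values.foldl (fun acc v =>
    acc ++ [(PySem.List.pyGetD v 0 ("", 0)).1 ++ (PySem.List.pyGetD v 1 ("", 0)).1]) []

-- ===== PORT B =====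
-- Source B's inner `for p in range(len(run) - 1)` scan: the tail run[p:] from the
-- first non-last element of the run with price <= t, if any.
def bStart (t : Int) : List (String × String × Int) → Option (List (String × String × Int))
  | [] => none
  | [_] => none
  | x :: y :: r => if x.2.2 ≤ t then some (x :: y :: r) else bStart t (y :: r)

-- body of Source B's outer while loop, for one run
def bRun (t : Int) (res : List String) (run : List (String × String × Int)) : List String :=
  match bStart t run with
  | none => res
  | some g =>
      let names := PySem.List.sorted (g.map (fun e => e.2.1)) (fun nm => nm) false
      res ++ [PySem.List.pyGetD names 0 "" ++ PySem.List.pyGetD names 1 ""]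

-- Source B's outer `while rest:` loop: split off the leading run of equal keys
def bLoop (t : Int) (res : List String) : List (String × String × Int) → List String
  | [] => res
  | x :: xs =>
      bLoop t (bRun t res (x :: xs.takeWhile (fun y => y.1 == x.1)))
        (xs.dropWhile (fun y => y.1 == x.1))
  termination_by rest => rest.length
  decreasing_by
    have := List.length_dropWhile_le (fun y => y.1 == x.1) xs
    simp only [List.length_cons]; omega

def proc_input_alt (l : List (String × String × Int)) (t : Int) : List String :=
  bLoop t [] (PySem.List.sorted l (fun x => x.1) false)

-- ===== PRECONDITION & SPEC =====
def Spec_proc_input (l : List (String × String × Int)) (t : Int) (out : List String) : Prop := out = proc_input_alt l t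
instance (l : List (String × String × Int)) (t : Int) (out : List String) : Decidable (Spec_proc_input l t out) := by unfold Spec_proc_input; infer_instance

-- ===== CLAIM (what is proved, stated in full; the proofs are below) =====
def Claim_equal_proc_input : Prop := ∀ (l : List (String × String × Int)) (t : Int), Dom_proc_input l t → Spec_proc_input l t (proc_input l t)

-- ===== LEMMAS AND PROOFS =====

-- Structural view of A's index loop: each element paired with its successor.
def nextOf (l : List (String × String × Int)) (o : Option (String × String × Int)) :
    Option (String × String × Int) :=
  match l with
  | [] => o
  | y :: _ => some y

def withNextA : List (String × String × Int) → Option (String × String × Int) →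
    List ((String × String × Int) × Option (String × String × Int))
  | [], _ => []
  | [x], o => [(x, o)]
  | x :: y :: r, o => (x, some y) :: withNextA (y :: r) o

-- A's loop body in structural (lookahead) form
def aStep (t : Int) (d : PySem.Dict String (List (String × Int)))
    (xn : (String × String × Int) × Option (String × String × Int)) :
    PySem.Dict String (List (String × Int)) :=
  let x := xn.1
  if d.contains x.1 = false then
    if (match xn.2 with
        | some y => (y.1 == x.1) && decide (x.2.2 ≤ t)
        | none => false) then
      d.insert x.1 [(x.2.1, x.2.2)]
    else d
  else
    d.modify x.1 [] (fun v => v ++ [(x.2.1, x.2.2)])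

-- the per-run items of A's dict, phrased over runs (mirrors B's structure)
def entries (t : Int) : List (String × String × Int) → List (String × List (String × Int))
  | [] => []
  | x :: xs =>
      let rest := xs.dropWhile (fun y => y.1 == x.1)
      match bStart t (x :: xs.takeWhile (fun y => y.1 == x.1)) with
      | none => entries t rest
      | some g => (x.1, g.map (fun e => (e.2.1, e.2.2))) :: entries t rest
  termination_by rest => rest.length
  decreasing_by
    have := List.length_dropWhile_le (fun y => y.1 == x.1) xs
    simp only [List.length_cons]; omega

lemma map_insertBy {α β : Type} (f : α → β) (bf : α → α → Bool) (bg : β → β → Bool)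
    (h : ∀ a b, bf a b = bg (f a) (f b)) :
    ∀ (l : List α) (x : α),
      (PySem.List.insertBy bf x l).map f = PySem.List.insertBy bg (f x) (l.map f) := by
  intro l
  induction l with
  | nil => intro x; rfl
  | cons y ys ih =>
      intro x
      simp only [PySem.List.insertBy, List.map_cons]
      rw [h x y]
      split <;> simp [ih]

lemma sorted_map_fst (v : List (String × Int)) :
    PySem.List.sorted (v.map (fun p => p.1)) (fun nm => nm) false
      = (PySem.List.sorted v (fun p => p.1) false).map (fun p => p.1) := by
  rw [PySem.List.sorted_eq_foldl_insertBy, PySem.List.sorted_eq_foldl_insertBy]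
  have main : ∀ (l : List (String × Int)) (acc : List (String × Int)),
      (l.foldl (fun acc x => PySem.List.insertBy (fun a b => decide (a.1 < b.1)) x acc) acc).map (fun p => p.1)
        = (l.map (fun p => p.1)).foldl (fun acc x => PySem.List.insertBy (fun a b => decide (a < b)) x acc) (acc.map (fun p => p.1)) := by
    intro l
    induction l with
    | nil => intro acc; rfl
    | cons y ys ih =>
        intro acc
        rw [List.foldl_cons, List.map_cons, List.foldl_cons, ih,
          map_insertBy (fun p : String × Int => p.1) (fun a b => decide (a.1 < b.1))
            (fun a b => decide (a < b)) (fun a b => rfl) acc y]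
  simpa using (main v []).symm

lemma withNextA_cons (x : String × String × Int) (l : List (String × String × Int)) (o) :
    withNextA (x :: l) o = (x, nextOf l o) :: withNextA l o := by
  cases l <;> rfl

lemma withNextA_append :
    ∀ (run rest : List (String × String × Int)),
      withNextA (run ++ rest) none = withNextA run rest.head? ++ withNextA rest none := by
  intro run
  induction run with
  | nil => intro rest; rfl
  | cons x run ih =>
      intro rest
      rw [List.cons_append, withNextA_cons, withNextA_cons, ih rest, List.cons_append]
      congr 2
      match run, rest with
      | [], [] => rfl
      | [], r :: rest => rfl
      | y :: run, rest => rfl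

lemma afold_eq (t : Int) (s : List (String × String × Int)) :
    ∀ (m j : Nat) (d : PySem.Dict String (List (String × Int))), s.length - j = m →
      (PySem.List.pyRange (j : Int) (PySem.List.len s) 1).foldl (aBody t s (PySem.List.len s)) d
        = (withNextA (s.drop j) none).foldl (aStep t) d := by
  intro m
  induction m with
  | zero =>
      intro j d h
      have hj : s.length ≤ j := by omega
      rw [List.drop_eq_nil_of_le hj, PySem.List.pyRange_one_eq_nil (by simp; exact_mod_cast hj)]
      rfl
  | succ m ih =>
      intro j d h
      have hj : j < s.length := by omega
      rw [PySem.List.pyRange_one_cons (by simp; exact_mod_cast hj), List.foldl_cons,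
        List.drop_eq_getElem_cons hj, withNextA_cons, List.foldl_cons]
      have hstep : aBody t s (PySem.List.len s) d (j : Int) = aStep t d (s[j], nextOf (s.drop (j + 1)) none) := by
        have hx : PySem.List.pyGetD s (j : Int) ("", "", 0) = s[j] := by
          rw [PySem.List.pyGetD_natCast, List.getD_eq_getElem s _ hj]
        by_cases hlast : j + 1 < s.length
        · have hnext : PySem.List.pyGetD s ((j : Int) + 1) ("", "", 0) = s[j + 1] := by
            rw [PySem.List.pyGetD_eq_getElem s _ (by omega) (by exact_mod_cast by omega)]
            congr 1
          have hne : decide ((j : Int) ≠ PySem.List.len s - 1) = true := by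
            simp [PySem.List.len_eq]; omega
          have hd : nextOf (s.drop (j + 1)) none = some s[j + 1] := by
            rw [List.drop_eq_getElem_cons hlast]; rfl
          simp only [aBody, aStep, hx, hnext, hne, hd, Bool.true_and]
        · have hlen : j + 1 = s.length := by omega
          have hne : decide ((j : Int) ≠ PySem.List.len s - 1) = false := by
            simp [PySem.List.len_eq]; omega
          have hd : nextOf (s.drop (j + 1)) none = none := by
            rw [List.drop_eq_nil_of_le (by omega)]; rfl
          simp only [aBody, aStep, hx, hne, hd, Bool.false_and]
      rw [hstep]
      have : ((j : Int) + 1) = ((j + 1 : Nat) : Int) := by push_cast; ring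
      rw [this, ih (j + 1) _ (by omega)]

lemma contains_mk_append_key (pre : List (String × List (String × Int))) (k : String) (acc) :
    (PySem.Dict.mk (pre ++ [(k, acc)])).contains k = true := by
  simp [PySem.Dict.contains_mk]

lemma get?_mk_append_key (k : String) (pre : List (String × List (String × Int)))
    (hpre : ∀ p ∈ pre, p.1 ≠ k) (acc) :
    (PySem.Dict.mk (pre ++ [(k, acc)])).get? k = some acc := by
  induction pre with
  | nil => simp [PySem.Dict.get?_mk_cons]
  | cons p pre ih =>
      rw [List.cons_append, PySem.Dict.get?_mk_cons]
      have h1 : (p.1 == k) = false := by simp [hpre p (by simp)]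
      simp only [h1]
      rw [if_neg (by simp)]
      exact ih (fun q hq => hpre q (by simp [hq]))

lemma insert_mk_append_key (k : String) (pre : List (String × List (String × Int)))
    (hpre : ∀ p ∈ pre, p.1 ≠ k) (acc v) :
    (PySem.Dict.mk (pre ++ [(k, acc)])).insert k v = PySem.Dict.mk (pre ++ [(k, v)]) := by
  apply PySem.Dict.ext
  rw [PySem.Dict.items_insert_of_contains _ _ (contains_mk_append_key pre k acc)]
  show List.map _ (pre ++ [(k, acc)]) = _
  rw [List.map_append]
  congr 1
  · calc List.map (fun p => if (p.1 == k) = true then (k, v) else p) pre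
        = List.map (fun p => p) pre := by
          apply List.map_congr_left
          intro p hp
          have h1 : (p.1 == k) = false := by simp [hpre p hp]
          simp [h1]
      _ = pre := List.map_id' pre
  · simp

lemma run_append (t : Int) (k : String) :
    ∀ (run : List (String × String × Int)) (o : Option (String × String × Int))
      (pre : List (String × List (String × Int))) (acc : List (String × Int)),
      (∀ e ∈ run, e.1 = k) → (∀ p ∈ pre, p.1 ≠ k) →
      (withNextA run o).foldl (aStep t) (PySem.Dict.mk (pre ++ [(k, acc)]))
        = PySem.Dict.mk (pre ++ [(k, acc ++ run.map (fun e => (e.2.1, e.2.2)))]) := by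
  intro run
  induction run with
  | nil => intro o pre acc _ _; simp [withNextA]
  | cons x run ih =>
      intro o pre acc hk hpre
      rw [withNextA_cons, List.foldl_cons]
      have hx : x.1 = k := hk x (by simp)
      have hstep : aStep t (PySem.Dict.mk (pre ++ [(k, acc)])) (x, nextOf run o)
          = PySem.Dict.mk (pre ++ [(k, acc ++ [(x.2.1, x.2.2)])]) := by
        simp only [aStep, hx, contains_mk_append_key pre k acc]
        rw [if_neg (by simp)]
        show (PySem.Dict.mk (pre ++ [(k, acc)])).insert k _ = _
        rw [PySem.Dict.getD_eq_get?_getD, get?_mk_append_key k pre hpre acc]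
        rw [insert_mk_append_key k pre hpre acc]
        rfl
      rw [hstep, ih o pre (acc ++ [(x.2.1, x.2.2)]) (fun e he => hk e (by simp [he])) hpre]
      simp

lemma run_fold (t : Int) (k : String) :
    ∀ (run : List (String × String × Int)) (o : Option (String × String × Int))
      (d : PySem.Dict String (List (String × Int))),
      run ≠ [] → (∀ e ∈ run, e.1 = k) →
      (match o with | some y => y.1 ≠ k | none => True) → d.contains k = false →
      (withNextA run o).foldl (aStep t) d =
        match bStart t run with
        | none => d
        | some g => PySem.Dict.mk (d.items ++ [(k, g.map (fun e => (e.2.1, e.2.2)))]) := by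
  intro run
  induction run with
  | nil => intro o d h; exact absurd rfl h
  | cons x run ih =>
      intro o d _ hk ho hd
      have hx : x.1 = k := hk x (by simp)
      match run with
      | [] =>
          rw [show withNextA [x] o = [(x, o)] from rfl, List.foldl_cons, List.foldl_nil]
          simp [aStep, hx, hd, bStart]
          intro hcmatch
          exfalso
          cases o with
          | none => simp at hcmatch
          | some y =>
              have hyk : y.1 ≠ k := ho
              simp [hyk] at hcmatch
      | y :: r =>
          rw [withNextA_cons, List.foldl_cons]
          have hy : y.1 = k := hk y (by simp)
          have hcond : aStep t d (x, nextOf (y :: r) o)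
              = if x.2.2 ≤ t then d.insert k [(x.2.1, x.2.2)] else d := by
            have h1 : (y.1 == x.1) = true := by simp [hy, hx]
            simp [aStep, nextOf, hx, hd, hy]
          by_cases hle : x.2.2 ≤ t
          · rw [hcond, if_pos hle]
            have hins : d.insert k [(x.2.1, x.2.2)] = PySem.Dict.mk (d.items ++ [(k, [(x.2.1, x.2.2)])]) := by
              apply PySem.Dict.ext
              rw [PySem.Dict.items_insert_of_not_contains _ _ hd]
            rw [hins]
            have hpre : ∀ p ∈ d.items, p.1 ≠ k := by
              intro p hp hcontra
              have : d.contains k = true := by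
                rw [show d = PySem.Dict.mk d.items from rfl, PySem.Dict.contains_mk]
                exact List.any_eq_true.mpr ⟨p, hp, by simp [hcontra]⟩
              rw [hd] at this; exact absurd this (by simp)
            rw [run_append t k (y :: r) o d.items [(x.2.1, x.2.2)]
              (fun e he => hk e (List.mem_cons_of_mem x he)) hpre]
            show _ = (match bStart t (x :: y :: r) with
              | none => d
              | some g => PySem.Dict.mk (d.items ++ [(k, g.map (fun e : String × String × Int => (e.2.1, e.2.2)))]))
            rw [show bStart t (x :: y :: r) = some (x :: y :: r) by simp [bStart, hle]]
            simp
          · rw [hcond, if_neg hle]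
            rw [ih o d (by simp) (fun e he => hk e (List.mem_cons_of_mem x he)) ho hd]
            show _ = (match bStart t (x :: y :: r) with
              | none => d
              | some g => PySem.Dict.mk (d.items ++ [(k, g.map (fun e : String × String × Int => (e.2.1, e.2.2)))]))
            rw [show bStart t (x :: y :: r) = bStart t (y :: r) by simp [bStart, hle]]

lemma fold_entries (t : Int) :
    ∀ (n : Nat) (s : List (String × String × Int)) (d : PySem.Dict String (List (String × Int))),
      s.length ≤ n → s.Pairwise (fun a b => a.1 ≤ b.1) →
      (∀ e ∈ s, d.contains e.1 = false) →
      (withNextA s none).foldl (aStep t) d = PySem.Dict.mk (d.items ++ entries t s) := by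
  intro n
  induction n with
  | zero =>
      intro s d hlen _ _
      have hs : s = [] := List.eq_nil_of_length_eq_zero (by omega)
      subst hs
      simp [withNextA, entries]
  | succ n ih =>
      intro s d hlen hpw hcont
      match s with
      | [] => simp [withNextA, entries]
      | x :: xs =>
          have hrun_k : ∀ e ∈ x :: xs.takeWhile (fun y => y.1 == x.1), e.1 = x.1 := by
            intro e he
            rcases List.mem_cons.mp he with h | h
            · rw [h]
            · simpa using List.mem_takeWhile_imp h
          have hsplit : x :: xs
              = (x :: xs.takeWhile (fun y => y.1 == x.1)) ++ xs.dropWhile (fun y => y.1 == x.1) := by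
            rw [List.cons_append, List.takeWhile_append_dropWhile]
          have hxle : ∀ e ∈ xs, x.1 ≤ e.1 := (List.pairwise_cons.mp hpw).1
          have hpw_xs := (List.pairwise_cons.mp hpw).2
          have hrest_mem : ∀ e ∈ xs.dropWhile (fun y => y.1 == x.1), e ∈ xs :=
            fun e he => (List.dropWhile_sublist _).mem he
          have hpw_rest := hpw_xs.sublist (List.dropWhile_sublist (fun y : String × String × Int => y.1 == x.1))
          have hrest_gt : ∀ e ∈ xs.dropWhile (fun y => y.1 == x.1), x.1 < e.1 := by
            cases hrr : xs.dropWhile (fun y => y.1 == x.1) with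
            | nil => simp
            | cons h tail =>
                have hh_ne : (h.1 == x.1) = false := by
                  have h0 := List.head?_dropWhile_not (fun y => y.1 == x.1) xs
                  rw [hrr] at h0
                  exact h0
                have hh_mem : h ∈ xs := hrest_mem h (by rw [hrr]; simp)
                have hxh : x.1 < h.1 :=
                  lt_of_le_of_ne (hxle h hh_mem) (Ne.symm (by simpa using hh_ne))
                intro e he
                rcases List.mem_cons.mp he with h1 | h1
                · rw [h1]; exact hxh
                · refine lt_of_lt_of_le hxh ?_
                  have := (List.pairwise_cons.mp (hrr ▸ hpw_rest)).1
                  exact this e h1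
          have hok : (match (xs.dropWhile (fun y => y.1 == x.1)).head? with
              | some y => y.1 ≠ x.1 | none => True) := by
            have h0 := List.head?_dropWhile_not (fun y => y.1 == x.1) xs
            cases hh : (xs.dropWhile (fun y => y.1 == x.1)).head? with
            | none => trivial
            | some y => rw [hh] at h0; simpa using h0
          conv_lhs => rw [hsplit]
          rw [withNextA_append, List.foldl_append,
            run_fold t x.1 _ _ d (by simp) hrun_k hok (hcont x (by simp))]
          have hlen_rest : (xs.dropWhile (fun y => y.1 == x.1)).length ≤ n := by
            have := List.length_dropWhile_le (fun y => y.1 == x.1) xs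
            simp only [List.length_cons] at hlen
            omega
          rw [show entries t (x :: xs)
              = match bStart t (x :: xs.takeWhile (fun y => y.1 == x.1)) with
                | none => entries t (xs.dropWhile (fun y => y.1 == x.1))
                | some g => (x.1, g.map (fun e => (e.2.1, e.2.2)))
                    :: entries t (xs.dropWhile (fun y => y.1 == x.1)) from by rw [entries]]
          cases hbs : bStart t (x :: xs.takeWhile (fun y => y.1 == x.1)) with
          | none =>
              exact ih _ d hlen_rest hpw_rest
                (fun e he => hcont e (List.mem_cons_of_mem x (hrest_mem e he)))
          | some g =>
              rw [ih _ (PySem.Dict.mk (d.items ++ [(x.1, g.map (fun e => (e.2.1, e.2.2)))]))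
                hlen_rest hpw_rest ?_]
              · simp
              · intro e he
                rw [PySem.Dict.contains_mk, List.any_append]
                have h1 : d.items.any (fun p => p.1 == e.1) = false := by
                  have := hcont e (List.mem_cons_of_mem x (hrest_mem e he))
                  rw [show d.contains e.1 = d.items.any (fun p => p.1 == e.1) from
                    PySem.Dict.contains_mk d.items e.1] at this
                  exact this
                have h2 : (x.1 == e.1) = false := by
                  simpa using ne_of_lt (hrest_gt e he)
                simp [h1, h2]

lemma entries_key_mem (t : Int) :
    ∀ (n : Nat) (s : List (String × String × Int)), s.length ≤ n →
      ∀ kv ∈ entries t s, ∃ e ∈ s, kv.1 = e.1 := by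
  intro n
  induction n with
  | zero =>
      intro s hlen
      have hs : s = [] := List.eq_nil_of_length_eq_zero (by omega)
      subst hs
      simp [entries]
  | succ n ih =>
      intro s hlen kv hkv
      match s with
      | [] => simp [entries] at hkv
      | x :: xs =>
          have hlen_rest : (xs.dropWhile (fun y => y.1 == x.1)).length ≤ n := by
            have := List.length_dropWhile_le (fun y => y.1 == x.1) xs
            simp only [List.length_cons] at hlen
            omega
          have hrest_mem : ∀ e ∈ xs.dropWhile (fun y => y.1 == x.1), e ∈ xs :=
            fun e he => (List.dropWhile_sublist _).mem he
          rw [show entries t (x :: xs)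
              = match bStart t (x :: xs.takeWhile (fun y => y.1 == x.1)) with
                | none => entries t (xs.dropWhile (fun y => y.1 == x.1))
                | some g => (x.1, g.map (fun e => (e.2.1, e.2.2)))
                    :: entries t (xs.dropWhile (fun y => y.1 == x.1)) from by rw [entries]] at hkv
          cases hbs : bStart t (x :: xs.takeWhile (fun y => y.1 == x.1)) with
          | none =>
              rw [hbs] at hkv
              obtain ⟨e, he, hee⟩ := ih _ hlen_rest kv hkv
              exact ⟨e, List.mem_cons_of_mem x (hrest_mem e he), hee⟩
          | some g =>
              rw [hbs] at hkv
              rcases List.mem_cons.mp hkv with h | h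
              · exact ⟨x, by simp, by rw [h]⟩
              · obtain ⟨e, he, hee⟩ := ih _ hlen_rest kv h
                exact ⟨e, List.mem_cons_of_mem x (hrest_mem e he), hee⟩

lemma entries_keys_pairwise (t : Int) :
    ∀ (n : Nat) (s : List (String × String × Int)), s.length ≤ n →
      s.Pairwise (fun a b => a.1 ≤ b.1) →
      (entries t s).Pairwise (fun a b => a.1 < b.1) := by
  intro n
  induction n with
  | zero =>
      intro s hlen _
      have hs : s = [] := List.eq_nil_of_length_eq_zero (by omega)
      subst hs
      simp [entries]
  | succ n ih =>
      intro s hlen hpw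
      match s with
      | [] => simp [entries]
      | x :: xs =>
          have hxle : ∀ e ∈ xs, x.1 ≤ e.1 := (List.pairwise_cons.mp hpw).1
          have hpw_xs := (List.pairwise_cons.mp hpw).2
          have hrest_mem : ∀ e ∈ xs.dropWhile (fun y => y.1 == x.1), e ∈ xs :=
            fun e he => (List.dropWhile_sublist _).mem he
          have hpw_rest := hpw_xs.sublist
            (List.dropWhile_sublist (fun y : String × String × Int => y.1 == x.1))
          have hlen_rest : (xs.dropWhile (fun y => y.1 == x.1)).length ≤ n := by
            have := List.length_dropWhile_le (fun y => y.1 == x.1) xs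
            simp only [List.length_cons] at hlen
            omega
          have hrest_gt : ∀ e ∈ xs.dropWhile (fun y => y.1 == x.1), x.1 < e.1 := by
            cases hrr : xs.dropWhile (fun y => y.1 == x.1) with
            | nil => simp
            | cons h tail =>
                have hh_ne : (h.1 == x.1) = false := by
                  have h0 := List.head?_dropWhile_not (fun y => y.1 == x.1) xs
                  rw [hrr] at h0
                  exact h0
                have hh_mem : h ∈ xs := hrest_mem h (by rw [hrr]; simp)
                have hxh : x.1 < h.1 :=
                  lt_of_le_of_ne (hxle h hh_mem) (Ne.symm (by simpa using hh_ne))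
                intro e he
                rcases List.mem_cons.mp he with h1 | h1
                · rw [h1]; exact hxh
                · refine lt_of_lt_of_le hxh ?_
                  exact (List.pairwise_cons.mp (hrr ▸ hpw_rest)).1 e h1
          rw [show entries t (x :: xs)
              = match bStart t (x :: xs.takeWhile (fun y => y.1 == x.1)) with
                | none => entries t (xs.dropWhile (fun y => y.1 == x.1))
                | some g => (x.1, g.map (fun e => (e.2.1, e.2.2)))
                    :: entries t (xs.dropWhile (fun y => y.1 == x.1)) from by rw [entries]]
          cases bStart t (x :: xs.takeWhile (fun y => y.1 == x.1)) with
          | none => exact ih _ hlen_rest hpw_rest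
          | some g =>
              rw [List.pairwise_cons]
              refine ⟨?_, ih _ hlen_rest hpw_rest⟩
              intro kv hkv
              obtain ⟨e, he, hee⟩ := entries_key_mem t _ _ hlen_rest kv hkv
              rw [hee]
              exact hrest_gt e he

lemma upd_loop (f : List (String × Int) → List (String × Int)) :
    ∀ (todo done : List (String × List (String × Int))),
      ((done ++ todo).map (fun kv => kv.1)).Nodup →
      todo.foldl (fun d kv => d.insert kv.1 (f kv.2))
          (PySem.Dict.mk (done.map (fun kv => (kv.1, f kv.2)) ++ todo))
        = PySem.Dict.mk ((done ++ todo).map (fun kv => (kv.1, f kv.2))) := by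
  intro todo
  induction todo with
  | nil => intro done _; simp
  | cons kv todo ih =>
      intro done hnd
      rw [List.foldl_cons]
      have hkey : ∀ p ∈ done, p.1 ≠ kv.1 := by
        intro p hp
        have := List.Nodup.sublist (by
          have : (done.map (fun kv => kv.1) ++ kv.1 :: todo.map (fun kv => kv.1)).Sublist
              ((done ++ kv :: todo).map (fun kv => kv.1)) := by
            simp [List.map_append]
          exact this) hnd
        intro hc
        have hmem : kv.1 ∈ done.map (fun kv => kv.1) := List.mem_map.mpr ⟨p, hp, hc⟩
        exact (List.disjoint_of_nodup_append this) hmem (by simp)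
      have hkey2 : ∀ p ∈ todo, p.1 ≠ kv.1 := by
        intro p hp
        have h2 : ((kv :: todo).map (fun kv => kv.1)).Nodup := by
          have : ((kv :: todo).map (fun kv => kv.1)).Sublist ((done ++ kv :: todo).map (fun kv => kv.1)) := by
            simp [List.map_append]
          exact this.nodup hnd
        rw [List.map_cons, List.nodup_cons] at h2
        intro hc
        exact h2.1 (List.mem_map.mpr ⟨p, hp, hc⟩)
      have hcont : (PySem.Dict.mk (done.map (fun kv => (kv.1, f kv.2)) ++ kv :: todo)).contains kv.1 = true := by
        rw [PySem.Dict.contains_mk]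
        simp
      have hins : (PySem.Dict.mk (done.map (fun kv => (kv.1, f kv.2)) ++ kv :: todo)).insert kv.1 (f kv.2)
          = PySem.Dict.mk (done.map (fun kv => (kv.1, f kv.2)) ++ (kv.1, f kv.2) :: todo) := by
        apply PySem.Dict.ext
        rw [PySem.Dict.items_insert_of_contains _ _ hcont]
        show List.map (fun p => if (p.1 == kv.1) = true then (kv.1, f kv.2) else p)
            (done.map (fun kv => (kv.1, f kv.2)) ++ kv :: todo) = _
        rw [List.map_append, List.map_cons, List.map_map]
        congr 1
        · apply List.map_congr_left
          intro q hq
          have h1 : (q.1 == kv.1) = false := by simp [hkey q hq]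
          simp [Function.comp, h1]
        · congr 1
          · simp
          · calc List.map (fun p => if (p.1 == kv.1) = true then (kv.1, f kv.2) else p) todo
                = List.map (fun p => p) todo := by
                  apply List.map_congr_left
                  intro q hq
                  have h1 : (q.1 == kv.1) = false := by simp [hkey2 q hq]
                  simp [h1]
              _ = todo := List.map_id' todo
      rw [hins]
      have hstep : done.map (fun kv => (kv.1, f kv.2)) ++ (kv.1, f kv.2) :: todo
          = (done ++ [kv]).map (fun kv => (kv.1, f kv.2)) ++ todo := by
        simp
      rw [hstep, ih (done ++ [kv]) (by rw [List.append_assoc]; simpa using hnd)]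
      congr 1
      simp

lemma bLoop_eq (t : Int) :
    ∀ (n : Nat) (s : List (String × String × Int)) (res : List String), s.length ≤ n →
      bLoop t res s = res ++ (entries t s).map (fun kv =>
        (PySem.List.pyGetD (PySem.List.sorted kv.2 (fun it => it.1) false) 0 (("", 0) : String × Int)).1
          ++ (PySem.List.pyGetD (PySem.List.sorted kv.2 (fun it => it.1) false) 1 (("", 0) : String × Int)).1) := by
  intro n
  induction n with
  | zero =>
      intro s res hlen
      have hs : s = [] := List.eq_nil_of_length_eq_zero (by omega)
      subst hs
      simp [bLoop, entries]
  | succ n ih =>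
      intro s res hlen
      match s with
      | [] => simp [bLoop, entries]
      | x :: xs =>
          have hlen_rest : (xs.dropWhile (fun y => y.1 == x.1)).length ≤ n := by
            have := List.length_dropWhile_le (fun y => y.1 == x.1) xs
            simp only [List.length_cons] at hlen
            omega
          rw [show bLoop t res (x :: xs)
              = bLoop t (bRun t res (x :: xs.takeWhile (fun y => y.1 == x.1)))
                  (xs.dropWhile (fun y => y.1 == x.1)) from by rw [bLoop]]
          rw [show entries t (x :: xs)
              = match bStart t (x :: xs.takeWhile (fun y => y.1 == x.1)) with
                | none => entries t (xs.dropWhile (fun y => y.1 == x.1))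
                | some g => (x.1, g.map (fun e => (e.2.1, e.2.2)))
                    :: entries t (xs.dropWhile (fun y => y.1 == x.1)) from by rw [entries]]
          rw [ih _ _ hlen_rest]
          cases hbs : bStart t (x :: xs.takeWhile (fun y => y.1 == x.1)) with
          | none => rw [show bRun t res (x :: xs.takeWhile (fun y => y.1 == x.1)) = res from by
              rw [bRun, hbs]]
          | some g =>
              rw [show bRun t res (x :: xs.takeWhile (fun y => y.1 == x.1))
                  = res ++ [(PySem.List.pyGetD (PySem.List.sorted (g.map (fun e => (e.2.1, e.2.2)))
                        (fun it => it.1) false) 0 (("", 0) : String × Int)).1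
                      ++ (PySem.List.pyGetD (PySem.List.sorted (g.map (fun e => (e.2.1, e.2.2)))
                        (fun it => it.1) false) 1 (("", 0) : String × Int)).1] from ?_]
              · simp
              · rw [bRun, hbs]
                have hnames : PySem.List.sorted (g.map (fun e => e.2.1)) (fun nm => nm) false
                    = (PySem.List.sorted (g.map (fun e => (e.2.1, e.2.2))) (fun it => it.1) false).map
                        (fun p => p.1) := by
                  rw [show g.map (fun e => e.2.1)
                      = (g.map (fun e => (e.2.1, e.2.2))).map (fun p => p.1) from by
                        rw [List.map_map]; rfl]
                  exact sorted_map_fst _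
                have h0 := PySem.List.pyGetD_map (fun p : String × Int => p.1)
                  (PySem.List.sorted (g.map (fun e => (e.2.1, e.2.2))) (fun it => it.1) false)
                  0 (("", 0) : String × Int)
                have h1 := PySem.List.pyGetD_map (fun p : String × Int => p.1)
                  (PySem.List.sorted (g.map (fun e => (e.2.1, e.2.2))) (fun it => it.1) false)
                  1 (("", 0) : String × Int)
                show res ++ [PySem.List.pyGetD (PySem.List.sorted (g.map (fun e => e.2.1))
                      (fun nm => nm) false) 0 (("", 0) : String × Int).1
                    ++ PySem.List.pyGetD (PySem.List.sorted (g.map (fun e => e.2.1))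
                      (fun nm => nm) false) 1 (("", 0) : String × Int).1] = _
                rw [hnames, h0, h1]

lemma main_eq (t : Int) (s : List (String × String × Int))
    (hpw : s.Pairwise (fun a b => a.1 ≤ b.1)) :
    (((PySem.List.pyRange 0 (PySem.List.len s) 1).foldl
        (aBody t s (PySem.List.len s)) (PySem.Dict.mk [])).items.foldl
        (fun d kv => d.insert kv.1 (PySem.List.sorted kv.2 (fun it => it.1) false))
        ((PySem.List.pyRange 0 (PySem.List.len s) 1).foldl
          (aBody t s (PySem.List.len s)) (PySem.Dict.mk []))).values.foldl
      (fun acc v =>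
        acc ++ [(PySem.List.pyGetD v 0 ("", 0)).1 ++ (PySem.List.pyGetD v 1 ("", 0)).1]) []
      = bLoop t [] s := by
  have h1 : (PySem.List.pyRange 0 (PySem.List.len s) 1).foldl
      (aBody t s (PySem.List.len s)) (PySem.Dict.mk [])
      = PySem.Dict.mk (entries t s) := by
    have h := afold_eq t s s.length 0 (PySem.Dict.mk []) (Nat.sub_zero _)
    rw [Nat.cast_zero] at h
    rw [h, List.drop_zero]
    have h2 := fold_entries t s.length s (PySem.Dict.mk []) le_rfl hpw
      (fun e _ => by rw [PySem.Dict.contains_mk]; simp)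
    simpa using h2
  rw [h1]
  have hnodup : ((entries t s).map (fun kv => kv.1)).Nodup := by
    have hp := entries_keys_pairwise t s.length s le_rfl hpw
    rw [List.Nodup, List.pairwise_map]
    exact hp.imp (fun h => ne_of_lt h)
  have h2 := upd_loop (fun v => PySem.List.sorted v (fun it => it.1) false) (entries t s) []
    (by simpa using hnodup)
  simp only [List.nil_append, List.map_nil] at h2
  rw [show (PySem.Dict.mk (entries t s)).items = entries t s from rfl, h2]
  rw [show (PySem.Dict.mk ((entries t s).map
      (fun kv => (kv.1, PySem.List.sorted kv.2 (fun it => it.1) false)))).values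
    = ((entries t s).map
      (fun kv => (kv.1, PySem.List.sorted kv.2 (fun it => it.1) false))).map
        (fun p => p.2) from rfl]
  rw [PySem.List.foldl_append_singleton_eq_map, bLoop_eq t s.length s [] le_rfl]
  simp [List.map_map, Function.comp]

-- ===== VERDICT (by name: the statement is the Claim_ definition above) =====
theorem proc_input_spec : Claim_equal_proc_input := by
  intro l t _
  show proc_input l t = proc_input_alt l t
  unfold proc_input proc_input_alt
  exact main_eq t (PySem.List.sorted l (fun x => x.1) false)
    (PySem.List.sorted_pairwise l (fun x => x.1))
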